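-- pv_equiv track=rewrite | github.com/alchemistprime/reports-gen | src/docx_to_markdown.py | bold_all_caps_headings
-- ===== SOURCE A (Python) =====
-- def bold_all_caps_headings(markdown_content: str) -> str:
--     """
--     Convert standalone all-caps lines to bold markdown format.
--
--     In DOCX files, section headings are often styled as bold all-caps text.
--     Pandoc sometimes converts these as plain text. This function detects
--     standalone all-caps lines and wraps them in ** to make them bold.
--
--     Args:
--         markdown_content: Markdown text
--
--     Returns:
--         Markdown with all-caps lines bolded
--     """
--     lines = markdown_content.split('\n')
--     result = []
--
--     for i, line in enumerate(lines):
--         stripped = line.strip()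
--
--         # Check if this is an all-caps line (at least 2 words, all uppercase letters/spaces)
--         # Must be standalone (surrounded by blank lines or start/end of content)
--         # Must not already be bold (no ** markers)
--         if (stripped and
--             len(stripped.split()) >= 2 and
--             stripped.replace(' ', '').replace('-', '').isalpha() and
--             stripped.isupper() and
--             not stripped.startswith('**') and
--             not stripped.startswith('#') and
--             not stripped.startswith('-') and
--             not stripped.startswith('*')):
--
--             # Check if it's standalone (surrounded by empty lines)
--             prev_empty = (i == 0) or (not lines[i-1].strip())
--             next_empty = (i == len(lines)-1) or (not lines[i+1].strip())
--
--             if prev_empty and next_empty: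
--                 result.append(f'**{stripped}**')
--                 continue
--
--         result.append(line)
--
--     return '\n'.join(result)
-- ===== SOURCE B (Python) =====
-- def bold_all_caps_headings(markdown_content: str) -> str:
--     """Block-based rewrite: group lines into maximal runs of non-blank lines;
--     only a run of length 1 (a standalone line) can be a heading."""
--     lines = markdown_content.split('\n')
--     n = len(lines)
--     out = []
--     i = 0
--     while i < n:
--         if not lines[i].strip():
--             out.append(lines[i])
--             i += 1
--             continue
--         j = i
--         while j < n and lines[j].strip():
--             j += 1
--         block = lines[i:j]
--         if len(block) == 1:
--             s = block[0].strip()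
--             if (len(s.split()) >= 2 and
--                     s.replace(' ', '').replace('-', '').isalpha() and
--                     s.isupper() and
--                     not s.startswith(('#', '-', '*'))):
--                 block = ['**' + s + '**']
--         out.extend(block)
--         i = j
--     return '\n'.join(out)
-- ===== Notes on version B (the rewrite author's own statement) =====
-- stated objective: alternative
-- what changed: B groups the split lines into maximal runs of consecutive non-blank lines and bolds only one-line runs that pass the heading test, instead of A's per-line pass that re-checks both neighbour lines by index.
import Mathlib
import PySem

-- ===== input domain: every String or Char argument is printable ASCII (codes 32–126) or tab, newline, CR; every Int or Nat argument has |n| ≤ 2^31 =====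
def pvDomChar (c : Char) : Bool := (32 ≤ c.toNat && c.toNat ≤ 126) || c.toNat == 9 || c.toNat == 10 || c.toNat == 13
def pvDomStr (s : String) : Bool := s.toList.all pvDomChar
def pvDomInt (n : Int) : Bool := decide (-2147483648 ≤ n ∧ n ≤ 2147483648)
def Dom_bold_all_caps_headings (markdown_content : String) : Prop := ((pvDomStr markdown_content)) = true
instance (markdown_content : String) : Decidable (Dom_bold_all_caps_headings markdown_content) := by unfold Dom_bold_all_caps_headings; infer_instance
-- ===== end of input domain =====

-- B re-groups the lines into maximal non-blank blocks instead of testing each line's neighbours by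
-- index (objective: alternative decomposition, same O(n) cost); return values are proved equal.

-- hand port of Python str.isupper(): at least one cased character and no lowercase one —
-- exact on the ASCII domain, where the cased characters are exactly the letters a-z/A-Z
def pvIsupper (s : String) : Bool :=
  s.toList.any PySem.Chars.isalpha && !(s.toList.any PySem.Chars.islower)

-- ===== PORT A =====
-- A's heading test, line by line (the big conjunction inside A's `if`)
def pvPredA (s : String) : Bool :=
  !(s == "") &&
  decide (2 ≤ (PySem.Str.split₀ s).length) &&
  PySem.Str.strIsalpha (PySem.Str.replace (PySem.Str.replace s " " "") "-" "") &&
  pvIsupper s &&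
  !(PySem.Str.startswith s "**") &&
  !(PySem.Str.startswith s "#") &&
  !(PySem.Str.startswith s "-") &&
  !(PySem.Str.startswith s "*")

-- A's `for i, line in enumerate(lines)` loop: i is the index of `line`, `lines` the whole list
def pvGoA (lines : List String) : Nat → List String → List String
  | _, [] => []
  | i, line :: rest =>
    let stripped := PySem.Str.strip line
    if pvPredA stripped then
      let prevEmpty := (i == 0) || (PySem.Str.strip (lines.getD (i - 1) "") == "")
      let nextEmpty := (i == lines.length - 1) || (PySem.Str.strip (lines.getD (i + 1) "") == "")
      if prevEmpty && nextEmpty then ("**" ++ stripped ++ "**") :: pvGoA lines (i + 1) rest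
      else line :: pvGoA lines (i + 1) rest
    else line :: pvGoA lines (i + 1) rest

def bold_all_caps_headings (markdown_content : String) : String :=
  let lines := (PySem.Str.split? markdown_content "\n").getD []
  PySem.Str.join "\n" (pvGoA lines 0 lines)

-- ===== PORT B =====
-- a line is part of a block iff its stripped form is non-empty
def pvNB (l : String) : Bool := !(PySem.Str.strip l == "")

-- B's heading test for a standalone line
def pvPredB (s : String) : Bool :=
  decide (2 ≤ (PySem.Str.split₀ s).length) &&
  PySem.Str.strIsalpha (PySem.Str.replace (PySem.Str.replace s " " "") "-" "") &&
  pvIsupper s &&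
  !(PySem.Str.startswith s "#" || PySem.Str.startswith s "-" || PySem.Str.startswith s "*")

-- emit a block: only a one-line block may become a heading
def pvEmitB : List String → List String
  | [b] =>
    let s := PySem.Str.strip b
    if pvPredB s then ["**" ++ s ++ "**"] else [b]
  | block => block

-- B's outer while-loop: blank lines pass through; a maximal non-blank run is one block
def pvGoB : List String → List String
  | [] => []
  | line :: rest =>
    if PySem.Str.strip line == "" then line :: pvGoB rest
    else pvEmitB ((line :: rest).takeWhile pvNB) ++ pvGoB (rest.dropWhile pvNB)
termination_by ls => ls.length
decreasing_by
  · simp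
  · have := List.length_dropWhile_le pvNB rest
    simp; omega

def bold_all_caps_headings_alt (markdown_content : String) : String :=
  PySem.Str.join "\n" (pvGoB ((PySem.Str.split? markdown_content "\n").getD []))

-- ===== PRECONDITION & SPEC =====
def Spec_bold_all_caps_headings (markdown_content : String) (out : String) : Prop := out = bold_all_caps_headings_alt markdown_content
instance (markdown_content : String) (out : String) : Decidable (Spec_bold_all_caps_headings markdown_content out) := by unfold Spec_bold_all_caps_headings; infer_instance

-- ===== CLAIM (what is proved, stated in full; the proofs are below) =====
def Claim_equal_bold_all_caps_headings : Prop := ∀ (markdown_content : String), Dom_bold_all_caps_headings markdown_content → Spec_bold_all_caps_headings markdown_content (bold_all_caps_headings markdown_content)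

-- ===== LEMMAS AND PROOFS =====

-- the blank-or-end test A applies to the following line, expressed on the tail of the list
def pvNextB : List String → Bool
  | [] => true
  | r :: _ => PySem.Str.strip r == ""

-- reference form of the per-line pass: pb says "the previous line is blank or absent"
def pvRef (pb : Bool) : List String → List String
  | [] => []
  | l :: rest =>
    (if pvPredA (PySem.Str.strip l) && (pb && pvNextB rest)
      then ["**" ++ PySem.Str.strip l ++ "**"] else [l])
    ++ pvRef (PySem.Str.strip l == "") rest

theorem pvRef_nil (pb : Bool) : pvRef pb [] = [] := rfl

theorem pvRef_cons (pb : Bool) (l : String) (rest : List String) :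
    pvRef pb (l :: rest) =
      (if pvPredA (PySem.Str.strip l) && (pb && pvNextB rest)
        then ["**" ++ PySem.Str.strip l ++ "**"] else [l])
      ++ pvRef (PySem.Str.strip l == "") rest := rfl

theorem pvGoB_nil : pvGoB [] = [] := by rw [pvGoB]

theorem pvPredA_blank {s : String} (h : (s == "") = true) : pvPredA s = false := by
  simp [pvPredA, h]

theorem pvStartswith_star {cs : List Char} (h : PySem.Chars.startswith cs ['*', '*'] = true) :
    PySem.Chars.startswith cs ['*'] = true := by
  rw [PySem.Chars.startswith_iff] at h ⊢
  exact List.IsPrefix.trans ⟨['*'], rfl⟩ h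

theorem pvPredAB {s : String} (h : (s == "") = false) : pvPredA s = pvPredB s := by
  by_cases h1 : PySem.Chars.startswith s.toList ['*'] = true
  · simp [pvPredA, pvPredB, h1]
  · have h1' : PySem.Chars.startswith s.toList ['*'] = false := by simpa using h1
    have h2 : PySem.Chars.startswith s.toList ['*', '*'] = false := by
      cases hx : PySem.Chars.startswith s.toList ['*', '*'] with
      | false => rfl
      | true => exact absurd (pvStartswith_star hx) (by simp [h1'])
    simp [pvPredA, pvPredB, h, h1', h2, Bool.and_assoc]

-- pb is irrelevant when the list starts blank (or is empty)
theorem pvRef_pb_irrel (pb : Bool) (ls : List String) (h : pvNextB ls = true) :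
    pvRef pb ls = pvRef true ls := by
  cases ls with
  | nil => rfl
  | cons l rest =>
    simp only [pvNextB] at h
    simp [pvRef_cons, pvPredA_blank h]

-- the head of a dropWhile result does not satisfy the predicate
theorem pvDW_head {α : Type} (p : α → Bool) (ls : List α) :
    ∀ x ∈ (ls.dropWhile p).head?, p x = false := by
  induction ls with
  | nil => simp
  | cons a tl ih =>
    by_cases hp : p a = true
    · simpa [List.dropWhile_cons, hp] using ih
    · simp only [Bool.not_eq_true] at hp
      simp [List.dropWhile_cons, hp]

theorem pvDW_nextB (ls : List String) : pvNextB (ls.dropWhile pvNB) = true := by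
  cases hd : ls.dropWhile pvNB with
  | nil => rfl
  | cons r tl =>
    have := pvDW_head pvNB ls r (by simp [hd])
    simp only [pvNB, Bool.not_eq_eq_eq_not] at this
    simpa [pvNextB] using this

-- inside a run (previous line non-blank) nothing is bolded until the run ends
theorem pvRef_run : ∀ (rest : List String) (l : String), pvNB l = true →
    pvRef false (l :: rest) =
      (l :: rest).takeWhile pvNB ++ pvRef false (rest.dropWhile pvNB) := by
  intro rest
  induction rest with
  | nil =>
    intro l hl
    simp [pvRef_cons, pvRef_nil, List.takeWhile_cons, hl]
  | cons r rest' ih =>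
    intro l hl
    have hl' : (PySem.Str.strip l == "") = false := by simpa [pvNB] using hl
    by_cases hr : pvNB r = true
    · rw [pvRef_cons, hl', if_neg (by simp), ih r hr]
      simp [List.takeWhile_cons, hl, hr, List.dropWhile_cons]
    · have hr' : pvNB r = false := by simpa using hr
      rw [pvRef_cons, hl', if_neg (by simp)]
      simp [List.takeWhile_cons, hl, hr', List.dropWhile_cons]

-- B's block pass equals the reference pass started with a blank left context
theorem pvGoB_eq_ref : ∀ (n : Nat) (ls : List String), ls.length ≤ n → pvGoB ls = pvRef true ls := by
  intro n
  induction n with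
  | zero =>
    intro ls h
    rw [List.length_eq_zero_iff.mp (Nat.le_zero.mp h), pvGoB_nil, pvRef_nil]
  | succ n ih =>
    intro ls h
    cases ls with
    | nil => rw [pvGoB_nil, pvRef_nil]
    | cons l rest =>
      simp only [List.length_cons, Nat.succ_le_succ_iff] at h
      by_cases hb : (PySem.Str.strip l == "") = true
      · rw [pvGoB, if_pos hb, ih rest h, pvRef_cons]
        simp [pvPredA_blank hb, hb]
      · have hb' : (PySem.Str.strip l == "") = false := by simpa using hb
        have hnb : pvNB l = true := by simp [pvNB, hb']
        cases rest with
        | nil =>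
          rw [pvGoB, if_neg hb]
          simp only [List.takeWhile_cons, hnb, if_pos rfl, List.takeWhile_nil,
            List.dropWhile_nil, pvGoB_nil, List.append_nil]
          rw [pvRef_cons, hb']
          simp [pvEmitB, pvNextB, pvRef_nil, pvPredAB hb']
        | cons r rest' =>
          by_cases hr : pvNB r = true
          · -- a run of length ≥ 2: the block is emitted unchanged
            have hrbf : (PySem.Str.strip r == "") = false := by
              simpa [pvNB, Bool.not_eq_eq_eq_not] using hr
            have hdw : (r :: rest').dropWhile pvNB = rest'.dropWhile pvNB := by
              simp [List.dropWhile_cons, hr]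
            have hlen : (rest'.dropWhile pvNB).length ≤ n := by
              have := List.length_dropWhile_le pvNB rest'
              simp only [List.length_cons] at h; omega
            rw [pvGoB, if_neg hb, hdw]
            rw [show (l :: r :: rest').takeWhile pvNB = l :: r :: rest'.takeWhile pvNB from by
              simp [List.takeWhile_cons, hnb, hr]]
            rw [show pvEmitB (l :: r :: rest'.takeWhile pvNB) = l :: r :: rest'.takeWhile pvNB
              from rfl]
            rw [pvRef_cons, hb', if_neg (by simp [pvNextB, hrbf])]
            rw [pvRef_run rest' r hr, pvRef_pb_irrel false _ (pvDW_nextB rest'), ih _ hlen]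
            simp [List.takeWhile_cons, hr]
          · -- the block is exactly [l]
            have hrb : (PySem.Str.strip r == "") = true := by
              simpa [pvNB, Bool.not_eq_eq_eq_not] using hr
            have htw : (l :: r :: rest').takeWhile pvNB = [l] := by
              simp [List.takeWhile_cons, pvNB, hb', hrb]
            have hdw : (r :: rest').dropWhile pvNB = r :: rest' := by
              simp [List.dropWhile_cons, pvNB, hrb]
            rw [pvGoB, if_neg hb, htw, hdw, ih _ h]
            rw [← pvRef_pb_irrel false _ (by simp [pvNextB, hrb])]
            rw [pvRef_cons true l (r :: rest'), hb']
            simp [pvEmitB, pvNextB, hrb, pvPredAB hb']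
  termination_by n => n

theorem pvGoA_cons (lines : List String) (i : Nat) (line : String) (rest : List String) :
    pvGoA lines i (line :: rest) =
      if pvPredA (PySem.Str.strip line) then
        if ((i == 0) || (PySem.Str.strip (lines.getD (i - 1) "") == ""))
            && ((i == lines.length - 1) || (PySem.Str.strip (lines.getD (i + 1) "") == "")) then
          ("**" ++ PySem.Str.strip line ++ "**") :: pvGoA lines (i + 1) rest
        else line :: pvGoA lines (i + 1) rest
      else line :: pvGoA lines (i + 1) rest := rfl

-- A's indexed pass equals the reference pass, given the suffix at index i
theorem pvGoA_eq_ref : ∀ (rest : List String) (lines : List String) (i : Nat) (line : String),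
    lines.drop i = line :: rest →
    pvGoA lines i (line :: rest)
      = pvRef ((i == 0) || (PySem.Str.strip (lines.getD (i - 1) "") == "")) (line :: rest) := by
  intro rest
  induction rest with
  | nil =>
    intro lines i line h
    have hlen : lines.length = i + 1 := by
      have h1 := congrArg List.length h
      simp only [List.length_drop, List.length_cons, List.length_nil] at h1
      have h2 : i < lines.length := by
        by_contra hc
        have : lines.drop i = [] := List.drop_eq_nil_of_le (by omega)
        simp [this] at h
      omega
    have hne : (i == lines.length - 1) = true := by simp [hlen]
    rw [pvRef_cons]
    simp only [pvGoA, pvNextB, hne, Bool.or_true, Bool.and_true, pvRef_nil, List.append_nil]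
    split_ifs <;> simp_all
  | cons r rest' ih =>
    intro lines i line h
    have hi : i < lines.length := by
      by_contra hc
      have : lines.drop i = [] := List.drop_eq_nil_of_le (by omega)
      simp [this] at h
    have hlen : lines.length = i + 2 + rest'.length := by
      have h1 := congrArg List.length h
      simp only [List.length_drop, List.length_cons] at h1
      omega
    have hdrop1 : lines.drop (i + 1) = r :: rest' := by
      have h2 : lines.drop (i + 1) = (lines.drop i).drop 1 := by rw [List.drop_drop]
      rw [h2, h]; rfl
    have hget1 : lines[i + 1]? = some r := by rw [← List.head?_drop, hdrop1]; rfl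
    have hgeti : lines[i]? = some line := by rw [← List.head?_drop, h]; rfl
    have hgetD1 : lines.getD (i + 1) "" = r := by simp [List.getD_eq_getElem?_getD, hget1]
    have hgetDi : lines.getD i "" = line := by simp [List.getD_eq_getElem?_getD, hgeti]
    have hne : (i == lines.length - 1) = false := by simp [hlen]; omega
    have hrec := ih lines (i + 1) r hdrop1
    have hpb : ((i + 1 == 0) || (PySem.Str.strip (lines.getD (i + 1 - 1) "") == ""))
        = (PySem.Str.strip line == "") := by
      simp [hgeti]
    rw [hpb] at hrec
    rw [pvGoA_cons, hne, hgetD1, hrec,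
      pvRef_cons ((i == 0) || (PySem.Str.strip (lines.getD (i - 1) "") == "")) line (r :: rest')]
    simp only [pvNextB, Bool.false_or]
    split_ifs <;> simp_all

-- ===== VERDICT (by name: the statement is the Claim_ definition above) =====
theorem bold_all_caps_headings_spec : Claim_equal_bold_all_caps_headings := by
  intro markdown_content _
  unfold Spec_bold_all_caps_headings bold_all_caps_headings bold_all_caps_headings_alt
  cases h : (PySem.Str.split? markdown_content "\n").getD [] with
  | nil =>
    show PySem.Str.join "\n" (pvGoA [] 0 []) = PySem.Str.join "\n" (pvGoB [])
    rw [pvGoB_nil]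
    rfl
  | cons line rest =>
    show PySem.Str.join "\n" (pvGoA (line :: rest) 0 (line :: rest))
      = PySem.Str.join "\n" (pvGoB (line :: rest))
    rw [pvGoA_eq_ref rest (line :: rest) 0 line (by simp)]
    rw [show (((0 : Nat) == 0) || (PySem.Str.strip ((line :: rest).getD (0 - 1) "") == ""))
      = true from by simp]
    rw [← pvGoB_eq_ref (line :: rest).length _ (Nat.le_refl _)]
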